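-- pv_equiv track=rewrite | github.com/matchupikchu/Quantum-and-Post-Quantum-Cryptography | MSS.py | MSS_get_path_indexes
-- ===== SOURCE A (Python) =====
-- def MSS_get_path_indexes(s : int, h : int) -> list[int]:
--
--     v_h = []
--     s_i = s + (2**h) - 1
--
--     for i in range(0, h):
--         if s_i % 2 == 0:
--             v_h += [s_i - 1]
--             s_i = (s_i // 2) - 1
--         else:
--             v_h += [s_i + 1]
--             s_i = s_i // 2
--
--     return v_h
-- ===== SOURCE B (Python) =====
-- def MSS_get_path_indexes(s: int, h: int) -> list[int]:
--     # Closed form: each auth-path index is derived independently from the fixed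
--     # value t = s + 2**h: the sibling at level i is m = t >> i if m is even,
--     # else m - 2.  No threaded state, no parent recurrence.
--     out = []
--     if h > 0:
--         t = s + 2**h
--         for i in range(h):
--             m = t >> i
--             out.append(m if m % 2 == 0 else m - 2)
--     return out
-- ===== Notes on version B (the rewrite author's own statement) =====
-- stated objective: alternative
-- what changed: Replaced the accumulator recurrence (running node index s_i updated with parity branches each level) by a closed-form per-level computation: each sibling index is derived independently as a shift of the fixed value t = s + 2**h plus a parity adjustment.
import Mathlib
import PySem

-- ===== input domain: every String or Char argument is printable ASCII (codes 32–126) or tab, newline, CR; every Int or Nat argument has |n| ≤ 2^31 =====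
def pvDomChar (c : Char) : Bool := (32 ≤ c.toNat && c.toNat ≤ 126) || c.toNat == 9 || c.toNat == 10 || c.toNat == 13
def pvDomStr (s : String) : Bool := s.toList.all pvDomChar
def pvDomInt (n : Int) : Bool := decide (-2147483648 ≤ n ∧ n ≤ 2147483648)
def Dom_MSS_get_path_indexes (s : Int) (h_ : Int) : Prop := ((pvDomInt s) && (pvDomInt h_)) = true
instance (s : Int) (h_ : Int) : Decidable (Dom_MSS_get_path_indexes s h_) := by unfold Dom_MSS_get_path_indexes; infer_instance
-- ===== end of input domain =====

-- B replaces A's threaded accumulator (running node index updated per level with parity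
-- branches) by computing each auth-path index independently from s + 2^h (objective: alternative).

-- ===== PORT A =====
-- A threads state (v_h, s_i) through 'for i in range(0, h)'; ported as a foldl over pyRange.
-- (Python's 2**h is a float for h < 0, but then the loop is empty and the initial value is
-- unused, so 2 ^ h_.toNat is exact on every input.)
def MSS_get_path_indexes (s : Int) (h_ : Int) : List Int :=
  let sInit : Int := s + 2 ^ h_.toNat - 1
  let r := (PySem.List.pyRange 0 h_ 1).foldl
    (fun (st : List Int × Int) (_ : Int) =>
      if PySem.Int.mod st.2 2 = 0 then (st.1 ++ [st.2 - 1], PySem.Int.floordiv st.2 2 - 1)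
      else (st.1 ++ [st.2 + 1], PySem.Int.floordiv st.2 2))
    ([], sInit)
  r.1

-- ===== PORT B =====
-- Source B: if h > 0, t = s + 2**h once, then for each i in range(h) emit m = t >> i
-- adjusted by parity (Python's >> on int is Lean's >>> on Int, PYSEM.md).
def MSS_get_path_indexes_alt (s : Int) (h_ : Int) : List Int :=
  if h_ > 0 then
    let t := s + 2 ^ h_.toNat
    (PySem.List.pyRange 0 h_ 1).map (fun i =>
      let m := t >>> i.toNat
      if PySem.Int.mod m 2 = 0 then m else m - 2)
  else []

-- ===== PRECONDITION & SPEC =====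
def Spec_MSS_get_path_indexes (s : Int) (h_ : Int) (out : List Int) : Prop := out = MSS_get_path_indexes_alt s h_
instance (s : Int) (h_ : Int) (out : List Int) : Decidable (Spec_MSS_get_path_indexes s h_ out) := by unfold Spec_MSS_get_path_indexes; infer_instance

-- ===== CLAIM (what is proved, stated in full; the proofs are below) =====
def Claim_equal_MSS_get_path_indexes : Prop := ∀ (s : Int) (h_ : Int), Dom_MSS_get_path_indexes s h_ → Spec_MSS_get_path_indexes s h_ (MSS_get_path_indexes s h_)

-- ===== LEMMAS AND PROOFS =====

-- B's per-level value, restated over a Nat level index.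
def fN (t : Int) (i : Nat) : Int :=
  let m := PySem.Int.floordiv t (2 ^ i)
  if PySem.Int.mod m 2 = 0 then m else m - 2

lemma fdiv_pow_succ (t : Int) (n : Nat) :
    PySem.Int.floordiv (PySem.Int.floordiv t (2 ^ n)) 2 = PySem.Int.floordiv t (2 ^ (n + 1)) := by
  simp only [PySem.Int.floordiv_eq_ediv_of_pos (by positivity : (0:Int) < 2 ^ n),
    PySem.Int.floordiv_eq_ediv_of_pos (by norm_num : (0:Int) < 2),
    PySem.Int.floordiv_eq_ediv_of_pos (by positivity : (0:Int) < 2 ^ n * 2),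
    Int.ediv_ediv_of_nonneg (by positivity : (0:Int) ≤ 2 ^ n), pow_succ]

-- One loop step of A, started at T - 1: it emits B's value at that level and
-- re-establishes the invariant with T replaced by T // 2.
lemma stepOne (T : Int) (X : List Int) :
  (if PySem.Int.mod (T - 1) 2 = 0 then (X ++ [T - 1 - 1], PySem.Int.floordiv (T - 1) 2 - 1)
   else (X ++ [T - 1 + 1], PySem.Int.floordiv (T - 1) 2))
  = (X ++ [if PySem.Int.mod T 2 = 0 then T else T - 2], PySem.Int.floordiv T 2 - 1) := by
  simp only [PySem.Int.mod_eq_emod_of_pos (by norm_num : (0:Int) < 2),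
    PySem.Int.floordiv_eq_ediv_of_pos (by norm_num : (0:Int) < 2)]
  split_ifs with h1 h2 h2 <;> simp only [Prod.mk.injEq, List.append_cancel_left_eq, List.cons.injEq, and_true] <;>
    constructor <;> omega

-- Invariant: after n steps from (acc, t - 1) A has emitted B's first n values and
-- its running index is t // 2^n - 1.
lemma core (t : Int) (n : Nat) (acc : List Int) :
    (List.range n).foldl
      (fun (st : List Int × Int) (_ : Nat) =>
        if PySem.Int.mod st.2 2 = 0 then (st.1 ++ [st.2 - 1], PySem.Int.floordiv st.2 2 - 1)
        else (st.1 ++ [st.2 + 1], PySem.Int.floordiv st.2 2))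
      (acc, t - 1)
    = (acc ++ (List.range n).map (fN t), PySem.Int.floordiv t (2 ^ n) - 1) := by
  induction n with
  | zero => simp
  | succ n ih =>
      rw [List.range_succ, List.foldl_append, List.map_append, ih, List.foldl_cons, List.foldl_nil]
      have := stepOne (PySem.Int.floordiv t (2 ^ n)) (acc ++ (List.range n).map (fN t))
      simp only at this ⊢
      rw [this, fdiv_pow_succ]
      simp [fN, List.append_assoc]

-- ===== VERDICT (by name: the statement is the Claim_ definition above) =====
theorem MSS_get_path_indexes_spec : Claim_equal_MSS_get_path_indexes := by
  intro s h_ _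
  unfold Spec_MSS_get_path_indexes MSS_get_path_indexes MSS_get_path_indexes_alt
  by_cases hpos : h_ > 0
  · simp only [hpos, if_pos]
    rw [PySem.List.pyRange_one 0 h_]
    rw [List.foldl_map, List.map_map]
    simp only [sub_zero]
    rw [core (s + 2 ^ h_.toNat) h_.toNat []]
    simp only [List.nil_append]
    refine List.map_congr_left (fun k _ => ?_)
    simp [fN, Int.shiftRight_natCast_right, Int.shiftRight_eq_div_pow]
  · simp only [hpos, if_neg, not_false_iff]
    rw [PySem.List.pyRange_one_eq_nil (by omega)]
    simp
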